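-- pv_equiv track=rewrite | github.com/Erroman/cpip | src/cpip/core/PpToken.py | _isOctalInteger
-- ===== SOURCE A (Python) =====
-- def _isOctalInteger(value):
--     """Returns True is value is an octal digit according to:
--     :title-reference:`ISO/IEC 14882:1998(E) 2.13.1 Integer literals [lex.icon] - octal-literal`.
--
--     Value must have been shorn of integer-suffix
--
--     :param value: The string to inspect.
--     :type value: ``str``
--
--     :returns: ``bool`` -- True if octal.
--     """
--     if len(value) < 2:
--         return False
--     if value[0] != '0':
--         return False
--     i = 1
--     chars = set('01234567')
--     while i < len(value):
--         if value[i] not in chars: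
--             return False
--         i += 1
--     return True
-- ===== SOURCE B (Python) =====
-- import re
--
-- _OCTAL_RE = re.compile(r'0[0-7]+')
--
-- def _isOctalInteger(value):
--     """Regex-based check that value is an octal integer literal: '0' followed
--     by one or more octal digits."""
--     return _OCTAL_RE.fullmatch(value) is not None
-- ===== Notes on version B (the rewrite author's own statement) =====
-- stated objective: idiomatic
-- what changed: Replaced the manual length check, first-char test and index-based while loop over a digit set by a single precompiled regex fullmatch r'0[0-7]+'.
import Mathlib
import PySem

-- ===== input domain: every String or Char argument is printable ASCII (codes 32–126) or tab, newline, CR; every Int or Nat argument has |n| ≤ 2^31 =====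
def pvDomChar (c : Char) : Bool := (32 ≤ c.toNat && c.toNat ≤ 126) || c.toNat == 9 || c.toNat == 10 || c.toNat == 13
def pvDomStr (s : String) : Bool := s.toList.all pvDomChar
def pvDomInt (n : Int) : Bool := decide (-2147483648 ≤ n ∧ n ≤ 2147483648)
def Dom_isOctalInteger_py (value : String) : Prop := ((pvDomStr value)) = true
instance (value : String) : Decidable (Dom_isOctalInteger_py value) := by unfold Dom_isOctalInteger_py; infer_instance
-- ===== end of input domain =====

-- B replaces A's manual index loop by a single fullmatch of the fixed regex 0[0-7]+ (more idiomatic, same cost).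
-- ===== PORT A =====
-- helper: the while loop of A, recursing on the index i
def pvOctalChars : List Char := ['0','1','2','3','4','5','6','7']

def pvOctLoopA (cs : List Char) (i : Nat) : Bool :=
  if i < cs.length then
    if (cs[i]? = some '0' ∨ cs[i]? = some '1' ∨ cs[i]? = some '2' ∨ cs[i]? = some '3' ∨
        cs[i]? = some '4' ∨ cs[i]? = some '5' ∨ cs[i]? = some '6' ∨ cs[i]? = some '7') then
      pvOctLoopA cs (i + 1)
    else false
  else true
termination_by cs.length - i

-- port of A: length guard, first-char guard, then the index while-loop
def isOctalInteger_py (value : String) : Bool :=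
  if PySem.Str.len value < 2 then false
  else if PySem.Str.pyGet? value 0 ≠ some '0' then false
  else pvOctLoopA value.toList 1

-- ===== PORT B =====
-- port of B: the fixed regex 0[0-7]+ as a pattern match: leading '0', nonempty octal tail
def isOctalInteger_py_alt (value : String) : Bool :=
  match value.toList with
  | '0' :: rest => !rest.isEmpty && rest.all (fun c => c ∈ pvOctalChars)
  | _ => false

-- ===== PRECONDITION & SPEC =====
def Spec_isOctalInteger_py (value : String) (out : Bool) : Prop := out = isOctalInteger_py_alt value
instance (value : String) (out : Bool) : Decidable (Spec_isOctalInteger_py value out) := by unfold Spec_isOctalInteger_py; infer_instance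

-- ===== CLAIM (what is proved, stated in full; the proofs are below) =====
def Claim_equal_isOctalInteger_py : Prop := ∀ (value : String), Dom_isOctalInteger_py value → Spec_isOctalInteger_py value (isOctalInteger_py value)

-- ===== LEMMAS AND PROOFS =====

lemma pvOctLoopA_eq_all (cs : List Char) (i : Nat) :
    pvOctLoopA cs i = (cs.drop i).all (fun c => c ∈ pvOctalChars) := by
  fun_induction pvOctLoopA cs i with
  | case1 i hi hc ih =>
    rw [ih, List.drop_eq_getElem_cons hi]
    have hmem : cs[i] ∈ pvOctalChars := by
      simp only [List.getElem?_eq_getElem hi, Option.some.injEq] at hc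
      rcases hc with h|h|h|h|h|h|h|h <;> simp [pvOctalChars, h]
    rw [List.all_cons]
    simp [hmem]
  | case2 i hi hc =>
    rw [List.drop_eq_getElem_cons hi]
    have hg : cs[i]? = some cs[i] := List.getElem?_eq_getElem hi
    have hne : cs[i] ∉ pvOctalChars := by
      intro hmem
      apply hc
      simp only [pvOctalChars, List.mem_cons, List.not_mem_nil, or_false] at hmem
      rcases hmem with h|h|h|h|h|h|h|h <;> simp [hg, h]
    rw [List.all_cons]
    simp [hne]
  | case3 i hi =>
    have hd : List.drop i cs = [] := List.drop_eq_nil_of_le (by omega)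
    simp [hd]

-- ===== VERDICT (by name: the statement is the Claim_ definition above) =====
theorem isOctalInteger_py_spec : Claim_equal_isOctalInteger_py := by
  intro value _
  unfold Spec_isOctalInteger_py isOctalInteger_py isOctalInteger_py_alt
  rw [pvOctLoopA_eq_all]
  cases h : value.toList with
  | nil => simp [PySem.Str.len, h]
  | cons c rest =>
    simp only [PySem.Str.len_eq, h, PySem.Str.pyGet?_eq, PySem.Chars.pyGet?_eq_listPyGet?]
    by_cases hc : c = '0'
    · subst hc
      cases rest with
      | nil => simp
      | cons d ds =>
        have hnn : (0:Int) ≤ (ds.length:Int) + 1 := by omega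
        simp [PySem.List.pyGet?, PySem.List.pyIdx?, hnn]
    · simp [PySem.List.pyGet?, PySem.List.pyIdx?, hc]
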